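-- pv_equiv track=rewrite | github.com/Matteo-Bormolini/servicos-digitais | servicosdigitais/app/utilidades/validadores.py | senha_segura
-- ===== SOURCE A (Python) =====
-- def senha_segura(senha):
--     """
--     Verifica se a senha atende aos critérios de segurança:
--     - Pelo menos 6 caracteres
--     - Pelo menos uma letra maiúscula
--     - Pelo menos uma letra minúscula
--     - Pelo menos um número
--     - Pelo menos um caractere especial
--     """
--     if len(senha) < 6:
--         return False
--     has_upper = any(c.isupper() for c in senha)
--     has_lower = any(c.islower() for c in senha)
--     has_digit = any(c.isdigit() for c in senha)
--     has_special = any(not c.isalnum() for c in senha)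
--     return has_upper and has_lower and has_digit and has_special
-- ===== SOURCE B (Python) =====
-- def senha_segura(senha):
--     if len(senha) < 6:
--         return False
--     has_upper = has_lower = has_digit = has_special = False
--     for c in senha:
--         if has_upper and has_lower and has_digit and has_special:
--             break
--         has_upper = has_upper or c.isupper()
--         has_lower = has_lower or c.islower()
--         has_digit = has_digit or c.isdigit()
--         has_special = has_special or not c.isalnum()
--     return has_upper and has_lower and has_digit and has_special
-- ===== Notes on version B (the rewrite author's own statement) =====
-- stated objective: alternative
-- what changed: Replaces four whole-string any() scans with a single accumulating pass that maintains four flags and stops early once all are set.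
import Mathlib
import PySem

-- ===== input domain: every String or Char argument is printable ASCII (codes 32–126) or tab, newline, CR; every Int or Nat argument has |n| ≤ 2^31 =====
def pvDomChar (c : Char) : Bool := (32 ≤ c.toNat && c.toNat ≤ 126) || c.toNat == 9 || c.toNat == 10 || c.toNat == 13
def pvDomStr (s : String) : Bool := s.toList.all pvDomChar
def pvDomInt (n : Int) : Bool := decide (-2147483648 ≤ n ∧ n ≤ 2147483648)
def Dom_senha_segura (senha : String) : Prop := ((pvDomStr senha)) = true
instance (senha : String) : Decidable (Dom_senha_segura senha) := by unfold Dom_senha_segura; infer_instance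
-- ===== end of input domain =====

-- B replaces A's four whole-string any() scans by one accumulating pass with early exit (alternative decomposition).

-- ===== PORT A =====
def senha_segura (senha : String) : Bool :=
  if PySem.Str.len senha < 6 then false
  else
    let has_upper := senha.toList.any PySem.Chars.isupper
    let has_lower := senha.toList.any PySem.Chars.islower
    let has_digit := senha.toList.any PySem.Chars.isdigit
    let has_special := senha.toList.any (fun c => !(PySem.Chars.isalnum c))
    has_upper && has_lower && has_digit && has_special

-- ===== PORT B =====
def senha_segura_loop : List Char → Bool → Bool → Bool → Bool → Bool × Bool × Bool × Bool
  | [], u, l, d, s => (u, l, d, s)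
  | c :: cs, u, l, d, s =>
    if u && l && d && s then (u, l, d, s)
    else senha_segura_loop cs (u || PySem.Chars.isupper c) (l || PySem.Chars.islower c)
           (d || PySem.Chars.isdigit c) (s || !(PySem.Chars.isalnum c))

def senha_segura_alt (senha : String) : Bool :=
  if PySem.Str.len senha < 6 then false
  else
    let r := senha_segura_loop senha.toList false false false false
    r.1 && r.2.1 && r.2.2.1 && r.2.2.2

-- ===== PRECONDITION & SPEC =====
def Spec_senha_segura (senha : String) (out : Bool) : Prop := out = senha_segura_alt senha
instance (senha : String) (out : Bool) : Decidable (Spec_senha_segura senha out) := by unfold Spec_senha_segura; infer_instance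

-- ===== CLAIM (what is proved, stated in full; the proofs are below) =====
def Claim_equal_senha_segura : Prop := ∀ (senha : String), Dom_senha_segura senha → Spec_senha_segura senha (senha_segura senha)

-- ===== LEMMAS AND PROOFS =====
theorem senha_segura_loop_spec (cs : List Char) (u l d s : Bool) :
    (fun r : Bool × Bool × Bool × Bool => r.1 && r.2.1 && r.2.2.1 && r.2.2.2)
        (senha_segura_loop cs u l d s)
      = ((u || cs.any PySem.Chars.isupper) && (l || cs.any PySem.Chars.islower) &&
         (d || cs.any PySem.Chars.isdigit) && (s || cs.any (fun c => !(PySem.Chars.isalnum c)))) := by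
  induction cs generalizing u l d s with
  | nil => simp [senha_segura_loop]
  | cons c cs ih =>
    by_cases h : (u && l && d && s) = true
    · have hu : u = true := by revert h; cases u <;> cases l <;> cases d <;> cases s <;> simp
      have hl : l = true := by revert h; cases u <;> cases l <;> cases d <;> cases s <;> simp
      have hd : d = true := by revert h; cases u <;> cases l <;> cases d <;> cases s <;> simp
      have hs : s = true := by revert h; cases u <;> cases l <;> cases d <;> cases s <;> simp
      simp [senha_segura_loop, hu, hl, hd, hs]
    · simp only [senha_segura_loop, if_neg h, ih, List.any_cons]
      simp [Bool.or_assoc]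

-- ===== VERDICT (by name: the statement is the Claim_ definition above) =====
theorem senha_segura_spec : Claim_equal_senha_segura := by
  intro senha _
  unfold Spec_senha_segura senha_segura senha_segura_alt
  split_ifs with h
  · rfl
  · simpa using (senha_segura_loop_spec senha.toList false false false false).symm
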